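-- pv_equiv track=rewrite | github.com/AndreyRomanchev/ff-olymp | 16 sieve of eratosthenes/5.py | sieve_fast
-- ===== SOURCE A (Python) =====
-- def sieve_fast(n: int):
--     is_prime = [0] * (n + 1)
--     ans = []
--     for d in range(2, n + 1):
--         if is_prime[d] == 0:
--             for i in range(d, n + 1, d):
--                 is_prime[i] += 1
--         if is_prime[d] >= 3:
--             ans.append(str(d))
--     return ans
-- ===== SOURCE B (Python) =====
-- def sieve_fast(n: int):
--     # smallest-prime-factor table: spf[j] = least prime factor of j (0 = not yet known)
--     spf = [0] * (n + 1)
--     for i in range(2, n + 1):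
--         if spf[i] == 0:
--             for j in range(i, n + 1, i):
--                 if spf[j] == 0:
--                     spf[j] = i
--     # factorize each number by walking its spf chain, counting distinct primes
--     ans = []
--     for d in range(2, n + 1):
--         m = d
--         cnt = 0
--         while m > 1:
--             p = spf[m]
--             cnt += 1
--             while m % p == 0:
--                 m //= p
--         if cnt >= 3:
--             ans.append(str(d))
--     return ans
-- ===== Notes on version B (the rewrite author's own statement) =====
-- stated objective: alternative
-- what changed: Instead of A's divisor-count sieve (every prime increments a shared counter array at all its multiples and answers are emitted inside that same loop), B builds a smallest-prime-factor table (set-once marking) and then, in a separate pass, factorizes each number by walking its spf chain to count its distinct prime factors.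
import Mathlib
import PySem

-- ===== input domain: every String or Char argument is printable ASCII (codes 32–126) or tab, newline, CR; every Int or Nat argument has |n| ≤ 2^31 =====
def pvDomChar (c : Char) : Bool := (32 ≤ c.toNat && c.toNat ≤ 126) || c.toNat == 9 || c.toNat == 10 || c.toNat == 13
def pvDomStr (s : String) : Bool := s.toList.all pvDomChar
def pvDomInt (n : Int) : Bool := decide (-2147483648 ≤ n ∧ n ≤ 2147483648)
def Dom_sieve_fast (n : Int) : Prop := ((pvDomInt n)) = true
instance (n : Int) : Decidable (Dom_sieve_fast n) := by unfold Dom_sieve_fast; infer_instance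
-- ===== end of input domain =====

-- B replaces A's shared sieve array by independent per-number trial division (alternative
-- algorithm, not claimed faster); return values proved equal for every n.

-- ===== PORT A =====
-- is_prime[i] += 1  (read, then write; index always in range in A's loops)
def pvIncrAt (l : List Int) (i : Int) : List Int :=
  PySem.List.pySetD l i (PySem.List.pyGetD l i 0 + 1)

-- one iteration of A's outer 'for d in range(2, n+1)' loop, state = (is_prime, ans)
def pvSieveStep (n : Int) (st : List Int × List String) (d : Int) : List Int × List String :=
  let ip := if PySem.List.pyGetD st.1 d 0 == 0
            then (PySem.List.pyRange d (n + 1) d).foldl pvIncrAt st.1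
            else st.1
  (ip, if 3 ≤ PySem.List.pyGetD ip d 0 then st.2 ++ [PySem.Int.toStr d] else st.2)

def sieve_fast (n : Int) : List String :=
  ((PySem.List.pyRange 2 (n + 1) 1).foldl (pvSieveStep n)
     (List.replicate (n + 1).toNat (0 : Int), ([] : List String))).2

-- ===== PORT B =====
-- Source B's loop variables m, p, cnt are nonnegative ints throughout, so Nat carries the same
-- values exactly.
-- inner 'while m % p == 0: m //= p'.  The guards '2 ≤ p' / '0 < m' only make the recursion
-- total; they hold at every call B performs.
def pvStrip (p m : Nat) : Nat :=
  if h : 2 ≤ p ∧ 0 < m ∧ m % p = 0 then pvStrip p (m / p) else m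
termination_by m
decreasing_by exact Nat.div_lt_self h.2.1 (by omega)

theorem pvStrip_le (p m : Nat) : pvStrip p m ≤ m := by
  induction m using pvStrip.induct (p := p) with
  | case1 m h ih =>
    rw [pvStrip, dif_pos h]
    exact le_trans ih (Nat.div_le_self _ _)
  | case2 m h => rw [pvStrip, dif_neg h]

theorem pvStrip_le_div {p m : Nat} (hp : 2 ≤ p) (hm : 0 < m) (hd : m % p = 0) :
    pvStrip p m ≤ m / p := by
  rw [pvStrip, dif_pos ⟨hp, hm, hd⟩]
  exact pvStrip_le p (m / p)

-- body of Source B's spf-building inner loop: 'if spf[j] == 0: spf[j] = i'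
def pvMark (i : Int) (S : List Int) (j : Int) : List Int :=
  if PySem.List.pyGetD S j 0 == 0 then PySem.List.pySetD S j i else S

-- one iteration of Source B's 'for i in range(2, n+1)' spf-building loop
def pvSpfStep (n : Int) (S : List Int) (i : Int) : List Int :=
  if PySem.List.pyGetD S i 0 == 0
  then (PySem.List.pyRange i (n + 1) i).foldl (pvMark i) S
  else S

-- Source B's smallest-prime-factor table spf
def pvSpf (n : Int) : List Int :=
  (PySem.List.pyRange 2 (n + 1) 1).foldl (pvSpfStep n) (List.replicate (n + 1).toNat (0 : Int))

-- Source B's 'while m > 1' walk along the spf chain; the guards '2 ≤ p' / 'p ∣ m' only make the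
-- recursion total: they hold whenever S is the spf table Source B built.
def pvWalk (S : List Int) (m cnt : Nat) : Nat :=
  if h : 1 < m ∧ 2 ≤ PySem.List.pyGetD S (m : Int) 0
          ∧ (PySem.List.pyGetD S (m : Int) 0).toNat ∣ m then
    pvWalk S (pvStrip (PySem.List.pyGetD S (m : Int) 0).toNat m) (cnt + 1)
  else cnt
termination_by m
decreasing_by
  have h2 : 2 ≤ (PySem.List.pyGetD S (m : Int) 0).toNat := by omega
  have hs := pvStrip_le_div h2 (show 0 < m by omega) (Nat.dvd_iff_mod_eq_zero.mp h.2.2)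
  have hd : m / (PySem.List.pyGetD S (m : Int) 0).toNat < m := Nat.div_lt_self (by omega) (by omega)
  omega

def sieve_fast_alt (n : Int) : List String :=
  let spf := pvSpf n
  (PySem.List.pyRange 2 (n + 1) 1).foldl
    (fun ans d => if 3 ≤ pvWalk spf d.toNat 0 then ans ++ [PySem.Int.toStr d] else ans)
    ([] : List String)

-- ===== PRECONDITION & SPEC =====
def Spec_sieve_fast (n : Int) (out : List String) : Prop := out = sieve_fast_alt n
instance (n : Int) (out : List String) : Decidable (Spec_sieve_fast n out) := by unfold Spec_sieve_fast; infer_instance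

-- ===== CLAIM (what is proved, stated in full; the proofs are below) =====
def Claim_equal_sieve_fast : Prop := ∀ (n : Int), Dom_sieve_fast n → Spec_sieve_fast n (sieve_fast n)

-- ===== LEMMAS AND PROOFS =====

-- Common description both programs are reduced to: the numbers d < D with at least three
-- distinct prime factors, in increasing order, as strings.
def pvAns (D : Nat) : List String :=
  ((List.range D).filter (fun d => 3 ≤ d.primeFactors.card)).map (fun d => PySem.Int.toStr (d : Int))

theorem pvAns_zero : pvAns 0 = [] := by simp [pvAns]

theorem pvAns_succ (D : Nat) :
    pvAns (D + 1) =
      pvAns D ++ (if 3 ≤ D.primeFactors.card then [PySem.Int.toStr (D : Int)] else []) := by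
  by_cases h : 3 ≤ D.primeFactors.card <;>
    simp [pvAns, List.range_succ, List.filter_append, List.filter, h]

theorem pvAns_of_le_two {D : Nat} (h : D ≤ 2) : pvAns D = [] := by
  interval_cases D
  · exact pvAns_zero
  · rw [pvAns_succ, pvAns_zero]; simp
  · rw [pvAns_succ, pvAns_succ, pvAns_zero]; simp

-- ---------- B side: pvCount d = number of distinct prime factors of d ----------

theorem pvStrip_dvd (p m : Nat) : pvStrip p m ∣ m := by
  induction m using pvStrip.induct (p := p) with
  | case1 m h ih =>
    rw [pvStrip, dif_pos h]
    exact ih.trans (Nat.div_dvd_of_dvd (Nat.dvd_iff_mod_eq_zero.mpr h.2.2))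
  | case2 m h => rw [pvStrip, dif_neg h]

theorem pvStrip_pos {p m : Nat} (hm : 0 < m) : 0 < pvStrip p m :=
  Nat.pos_of_dvd_of_pos (pvStrip_dvd p m) hm

theorem pvStrip_not_dvd {p : Nat} (hp : 2 ≤ p) : ∀ m, 0 < m → ¬ p ∣ pvStrip p m := by
  intro m
  induction m using pvStrip.induct (p := p) with
  | case1 m h ih =>
    intro _
    rw [pvStrip, dif_pos h]
    exact ih (Nat.div_pos (Nat.le_of_dvd h.2.1 (Nat.dvd_iff_mod_eq_zero.mpr h.2.2)) (by omega))
  | case2 m h =>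
    intro hm hdvd
    rw [pvStrip, dif_neg h] at hdvd
    exact h ⟨hp, hm, Nat.dvd_iff_mod_eq_zero.mp hdvd⟩

theorem pvStrip_prime_dvd {p q : Nat} (hp : p.Prime) (hq : q.Prime) (hne : q ≠ p) :
    ∀ m, q ∣ m → q ∣ pvStrip p m := by
  intro m
  induction m using pvStrip.induct (p := p) with
  | case1 m h ih =>
    intro hdvd
    rw [pvStrip, dif_pos h]
    apply ih
    have hpm : p ∣ m := Nat.dvd_iff_mod_eq_zero.mpr h.2.2
    have hmul : m = p * (m / p) := (Nat.mul_div_cancel' hpm).symm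
    have hq2 : q ∣ p * (m / p) := hmul ▸ hdvd
    rcases (Nat.Prime.dvd_mul hq).1 hq2 with hqp | hok
    · exact absurd ((Nat.prime_dvd_prime_iff_eq hq hp).1 hqp) hne
    · exact hok
  | case2 m h =>
    intro hdvd
    rw [pvStrip, dif_neg h]
    exact hdvd

theorem pvStrip_primeFactors {p m : Nat} (hp : p.Prime) (hm : 0 < m) :
    (pvStrip p m).primeFactors = m.primeFactors.erase p := by
  ext q
  simp only [Nat.mem_primeFactors, Finset.mem_erase]
  constructor
  · rintro ⟨hq, hdvd, -⟩
    refine ⟨?_, hq, hdvd.trans (pvStrip_dvd p m), by omega⟩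
    rintro rfl
    exact pvStrip_not_dvd hp.two_le m hm hdvd
  · rintro ⟨hne, hq, hdvd, -⟩
    exact ⟨hq, pvStrip_prime_dvd hp hq hne m hdvd, by
      have := pvStrip_pos (p := p) hm; omega⟩

-- ---------- A side: the sieve array ----------

-- the value A's array holds at index k after the outer loop has processed d = 2 .. D-1
def pvCnt (D k : Nat) : Nat :=
  ((Finset.range D).filter (fun p => p.Prime ∧ p ∣ k ∧ p ≤ k)).card

theorem pvCnt_of_le_two {D : Nat} (h : D ≤ 2) (k : Nat) : pvCnt D k = 0 := by
  rw [pvCnt, Finset.card_eq_zero, Finset.filter_eq_empty_iff]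
  intro p hp
  simp only [Finset.mem_range] at hp
  rintro ⟨hpp, -, -⟩
  have := hpp.two_le
  omega

theorem pvCnt_succ (D k : Nat) :
    pvCnt (D + 1) k = pvCnt D k + (if D.Prime ∧ D ∣ k ∧ D ≤ k then 1 else 0) := by
  rw [pvCnt, pvCnt, Finset.range_add_one, Finset.filter_insert]
  split_ifs with hcond
  · rw [Finset.card_insert_of_notMem (by simp)]
  · rfl

theorem pvCnt_self_eq_zero_iff {D : Nat} (hD : 2 ≤ D) : pvCnt D D = 0 ↔ D.Prime := by
  rw [pvCnt, Finset.card_eq_zero, Finset.filter_eq_empty_iff]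
  constructor
  · intro h
    by_contra hnp
    have hmf : D.minFac.Prime := Nat.minFac_prime (by omega)
    have hdvd : D.minFac ∣ D := Nat.minFac_dvd D
    have hle : D.minFac ≤ D := Nat.le_of_dvd (by omega) hdvd
    have hne : D.minFac ≠ D := fun he => hnp (Nat.prime_def_minFac.mpr ⟨hD, he⟩)
    exact h (Finset.mem_range.2 (by omega)) ⟨hmf, hdvd, hle⟩
  · intro hP p hp
    simp only [Finset.mem_range] at hp
    rintro ⟨hpp, hpd, -⟩
    rcases Nat.Prime.eq_one_or_self_of_dvd hP p hpd with h1 | h2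
    · exact absurd h1 hpp.one_lt.ne'
    · omega

theorem pvCnt_eq_omega (D : Nat) (hd : 0 < D) : pvCnt (D + 1) D = D.primeFactors.card := by
  rw [pvCnt]
  congr 1
  ext q
  simp only [Finset.mem_filter, Finset.mem_range, Nat.mem_primeFactors]
  constructor
  · rintro ⟨-, hq, hqd, -⟩; exact ⟨hq, hqd, by omega⟩
  · rintro ⟨hq, hqd, -⟩
    have := Nat.le_of_dvd hd hqd
    exact ⟨by omega, hq, hqd, this⟩

theorem pvNodup_pyRange_pos {a b s : Int} (hs : 0 < s) : (PySem.List.pyRange a b s).Nodup := by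
  rw [PySem.List.pyRange_of_pos a b hs]
  refine List.Nodup.map ?_ List.nodup_range
  intro x y hxy
  have h1 : s * (x : Int) = s * (y : Int) := by
    have := add_left_cancel hxy
    exact this
  have h2 := mul_left_cancel₀ (show (s : Int) ≠ 0 by omega) h1
  exact_mod_cast h2

theorem pvLength_foldl_incr (idxs : List Int) (L : List Int) :
    (idxs.foldl pvIncrAt L).length = L.length := by
  induction idxs generalizing L with
  | nil => rfl
  | cons i t ih =>
    simp only [List.foldl_cons, ih, pvIncrAt, PySem.List.length_pySetD]

theorem pvGetD_foldl_incr (idxs : List Int) (L : List Int) (hnd : idxs.Nodup)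
    (hb : ∀ i ∈ idxs, 0 ≤ i ∧ i.toNat < L.length) (k : Nat) :
    (idxs.foldl pvIncrAt L).getD k 0
      = L.getD k 0 + (if (k : Int) ∈ idxs then 1 else 0) := by
  induction idxs generalizing L with
  | nil => simp
  | cons i t ih =>
    obtain ⟨hi0, hilen⟩ := hb i (by simp)
    have hset : pvIncrAt L i = L.set i.toNat (L.getD i.toNat 0 + 1) := by
      rw [pvIncrAt, PySem.List.pySetD_of_nonneg _ _ hi0, PySem.List.pyGetD_of_nonneg _ _ hi0]
    have hlen' : (pvIncrAt L i).length = L.length := by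
      rw [pvIncrAt, PySem.List.length_pySetD]
    rw [List.foldl_cons, ih (pvIncrAt L i) hnd.of_cons
      (fun j hj => ⟨(hb j (by simp [hj])).1, by rw [hlen']; exact (hb j (by simp [hj])).2⟩)]
    by_cases hk : k = i.toNat
    · have hki : (k : Int) = i := by omega
      have hknt : (k : Int) ∉ t := by rw [hki]; exact (List.nodup_cons.mp hnd).1
      have hmem : (k : Int) ∈ i :: t := by rw [hki]; exact List.mem_cons_self
      have hklen : k < L.length := by omega
      rw [if_neg hknt, if_pos hmem, hset, ← hk]
      simp [List.getD_eq_getElem?_getD, List.getElem?_set_self hklen,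
        List.getElem?_eq_getElem hklen]
    · have hki : (k : Int) ≠ i := by omega
      rw [hset, List.getD_eq_getElem?_getD, List.getD_eq_getElem?_getD,
        List.getElem?_set_ne (show i.toNat ≠ k by omega)]
      simp [List.mem_cons, hki]

-- membership in range(D, n+1, D): the multiples of D in [D, n]
theorem pvMem_mult {n : Int} {D k : Nat} (hD : 1 ≤ D) (hk : (k : Int) < n + 1) :
    ((k : Int) ∈ PySem.List.pyRange (D : Int) (n + 1) (D : Int)) ↔ (D ∣ k ∧ D ≤ k) := by
  rw [PySem.List.mem_pyRange_iff_of_pos (by positivity)]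
  constructor
  · rintro ⟨h1, -, h3⟩
    have h4 : (D : Int) ∣ ((k : Int) - (D : Int)) + (D : Int) := dvd_add h3 dvd_rfl
    have h5 : ((k : Int) - (D : Int)) + (D : Int) = (k : Int) := by ring
    rw [h5] at h4
    exact ⟨Int.natCast_dvd_natCast.mp h4, by omega⟩
  · rintro ⟨h1, h2⟩
    exact ⟨by omega, by omega, dvd_sub (Int.natCast_dvd_natCast.mpr h1) dvd_rfl⟩

-- the invariant A's array satisfies after the outer loop processed d = 2 .. D-1
def pvInv (n : Int) (D : Nat) (L : List Int) : Prop :=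
  L.length = (n + 1).toNat ∧
    ∀ k : Nat, k < (n + 1).toNat → L.getD k 0 = (pvCnt D k : Int)

theorem pvInv_init (n : Int) (D : Nat) (hD : D ≤ 2) :
    pvInv n D (List.replicate (n + 1).toNat (0 : Int)) := by
  refine ⟨List.length_replicate, fun k hk => ?_⟩
  rw [pvCnt_of_le_two hD]
  simp [List.getD_eq_getElem?_getD, hk]

theorem pvStep_inv (n : Int) (D : Nat) (hD : 2 ≤ D) (hDn : (D : Int) ≤ n)
    (L : List Int) (ans : List String) (hinv : pvInv n D L) :
    ∃ L', pvSieveStep n (L, ans) (D : Int)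
        = (L', ans ++ (if 3 ≤ D.primeFactors.card then [PySem.Int.toStr (D : Int)] else []))
      ∧ pvInv n (D + 1) L' := by
  obtain ⟨hlen, hval⟩ := hinv
  have hDlt : D < (n + 1).toNat := by omega
  have hgetL : PySem.List.pyGetD L (D : Int) 0 = (pvCnt D D : Int) := by
    rw [PySem.List.pyGetD_of_nonneg _ _ (by positivity), Int.toNat_natCast]
    exact hval D hDlt
  have hinv' : pvInv n (D + 1)
      (if PySem.List.pyGetD L (D : Int) 0 == 0
       then (PySem.List.pyRange (D : Int) (n + 1) (D : Int)).foldl pvIncrAt L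
       else L) := by
    by_cases hP : D.Prime
    · have hc0 : pvCnt D D = 0 := (pvCnt_self_eq_zero_iff hD).2 hP
      have hcond : (PySem.List.pyGetD L (D : Int) 0 == 0) = true := by
        rw [hgetL]; simp [hc0]
      rw [if_pos hcond]
      have hDpos : (0 : Int) < (D : Int) := by positivity
      have hbnd : ∀ i ∈ PySem.List.pyRange (D : Int) (n + 1) (D : Int),
          0 ≤ i ∧ i.toNat < L.length := by
        intro i hi
        rw [PySem.List.mem_pyRange_iff_of_pos hDpos] at hi
        refine ⟨by omega, ?_⟩
        rw [hlen]; omega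
      refine ⟨by rw [pvLength_foldl_incr, hlen], fun k hk => ?_⟩
      rw [pvGetD_foldl_incr _ _ (pvNodup_pyRange_pos hDpos) hbnd, hval k hk, pvCnt_succ]
      have hmem := pvMem_mult (n := n) (D := D) (k := k) (by omega) (by omega)
      by_cases hdk : D ∣ k ∧ D ≤ k
      · rw [if_pos (hmem.mpr hdk), if_pos ⟨hP, hdk.1, hdk.2⟩]; push_cast; ring
      · rw [if_neg (fun hm => hdk (hmem.mp hm)), if_neg (by tauto)]; push_cast; ring
    · have hc0 : pvCnt D D ≠ 0 := fun h => hP ((pvCnt_self_eq_zero_iff hD).1 h)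
      have hcond : (PySem.List.pyGetD L (D : Int) 0 == 0) = false := by
        rw [hgetL]
        simp only [beq_eq_false_iff_ne, ne_eq, Int.natCast_eq_zero]
        exact hc0
      rw [if_neg (by rw [hcond]; exact Bool.false_ne_true)]
      refine ⟨hlen, fun k hk => ?_⟩
      rw [hval k hk, pvCnt_succ, if_neg (by tauto)]
      push_cast; ring
  refine ⟨_, ?_, hinv'⟩
  have hgetIp : PySem.List.pyGetD
      (if PySem.List.pyGetD L (D : Int) 0 == 0
       then (PySem.List.pyRange (D : Int) (n + 1) (D : Int)).foldl pvIncrAt L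
       else L) (D : Int) 0 = (pvCnt (D + 1) D : Int) := by
    rw [PySem.List.pyGetD_of_nonneg _ _ (by positivity), Int.toNat_natCast]
    exact hinv'.2 D hDlt
  have hcond3 : (3 ≤ PySem.List.pyGetD
      (if PySem.List.pyGetD L (D : Int) 0 == 0
       then (PySem.List.pyRange (D : Int) (n + 1) (D : Int)).foldl pvIncrAt L
       else L) (D : Int) 0) ↔ 3 ≤ D.primeFactors.card := by
    rw [hgetIp, pvCnt_eq_omega D (by omega)]
    exact_mod_cast Iff.rfl
  simp only [pvSieveStep, Prod.mk.injEq]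
  refine ⟨by trivial, ?_⟩
  by_cases h3 : 3 ≤ D.primeFactors.card
  · rw [if_pos (hcond3.mpr h3), if_pos h3]
  · rw [if_neg (fun hc => h3 (hcond3.mp hc)), if_neg h3, List.append_nil]

theorem pvSieve_loop (n : Int) (D : Nat) (hD : (D : Int) ≤ n + 1) :
    ∃ L, (PySem.List.pyRange 2 (D : Int) 1).foldl (pvSieveStep n)
        (List.replicate (n + 1).toNat (0 : Int), ([] : List String)) = (L, pvAns D)
      ∧ pvInv n D L := by
  induction D with
  | zero =>
    refine ⟨_, ?_, pvInv_init n 0 (by omega)⟩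
    rw [PySem.List.pyRange_one_eq_nil (by omega), List.foldl_nil, pvAns_zero]
  | succ D ih =>
    by_cases hD2 : 2 ≤ D
    · obtain ⟨L, hfold, hinv⟩ := ih (by push_cast at hD ⊢; omega)
      have hsplit : PySem.List.pyRange 2 ((D : Int) + 1) 1
          = PySem.List.pyRange 2 (D : Int) 1 ++ [(D : Int)] :=
        PySem.List.pyRange_one_succ_right (by omega)
      obtain ⟨L', heq, hinv'⟩ := pvStep_inv n D hD2 (by push_cast at hD ⊢; omega) L (pvAns D) hinv
      refine ⟨L', ?_, hinv'⟩
      rw [show ((D + 1 : Nat) : Int) = (D : Int) + 1 by push_cast; ring, hsplit,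
        List.foldl_append, hfold]
      simp only [List.foldl_cons, List.foldl_nil]
      rw [heq, pvAns_succ]
    · -- D + 1 ≤ 2 : the outer loop has not started yet
      refine ⟨_, ?_, pvInv_init n (D + 1) (by omega)⟩
      rw [show ((D + 1 : Nat) : Int) = (D : Int) + 1 by push_cast; ring,
        PySem.List.pyRange_one_eq_nil (by omega), List.foldl_nil, pvAns_of_le_two (by omega)]

theorem pvSieve_fast_eq (n : Int) : sieve_fast n = pvAns (n + 1).toNat := by
  rw [sieve_fast]
  by_cases hn : 2 ≤ n + 1
  · obtain ⟨L, hfold, -⟩ := pvSieve_loop n (n + 1).toNat (by omega)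
    rw [show (((n + 1).toNat : Nat) : Int) = n + 1 by omega] at hfold
    rw [hfold]
  · rw [PySem.List.pyRange_one_eq_nil (by omega), List.foldl_nil,
      pvAns_of_le_two (by omega)]

-- ---------- B side: the spf table holds least prime factors, the walk counts them ----------

theorem pvMinFac_two_le {k : Nat} (hk : 2 ≤ k) : 2 ≤ k.minFac :=
  (Nat.minFac_prime (by omega : k ≠ 1)).two_le

theorem pvLength_foldl_mark (i : Int) (idxs : List Int) (S : List Int) :
    (idxs.foldl (pvMark i) S).length = S.length := by
  induction idxs generalizing S with
  | nil => rfl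
  | cons j t ih =>
    rw [List.foldl_cons, ih]
    rw [pvMark]
    split_ifs <;> simp [PySem.List.length_pySetD]

theorem pvGetD_foldl_mark (i : Int) (idxs : List Int) (S : List Int)
    (hnd : idxs.Nodup) (hb : ∀ j ∈ idxs, 0 ≤ j ∧ j.toNat < S.length) (k : Nat) :
    (idxs.foldl (pvMark i) S).getD k 0
      = if S.getD k 0 = 0 ∧ (k : Int) ∈ idxs then i else S.getD k 0 := by
  induction idxs generalizing S with
  | nil => simp
  | cons j t ih =>
    obtain ⟨hj0, hjlen⟩ := hb j (by simp)
    have hlen' : (pvMark i S j).length = S.length := by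
      rw [pvMark]; split_ifs <;> simp [PySem.List.length_pySetD]
    rw [List.foldl_cons, ih (pvMark i S j) hnd.of_cons
      (fun x hx => ⟨(hb x (by simp [hx])).1, by rw [hlen']; exact (hb x (by simp [hx])).2⟩)]
    by_cases hk : k = j.toNat
    · have hkj : (k : Int) = j := by omega
      have hknt : (k : Int) ∉ t := by rw [hkj]; exact (List.nodup_cons.mp hnd).1
      have hklen : k < S.length := by omega
      by_cases h0 : S.getD k 0 = 0
      · have hcond : (PySem.List.pyGetD S j 0 == 0) = true := by
          rw [PySem.List.pyGetD_of_nonneg _ _ hj0, ← hk, h0]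
          decide
        have hgv : (pvMark i S j).getD k 0 = i := by
          rw [pvMark, if_pos hcond, PySem.List.pySetD_of_nonneg _ _ hj0, ← hk,
            List.getD_eq_getElem?_getD, List.getElem?_set_self hklen, Option.getD_some]
        rw [hgv, if_neg (fun hc => hknt hc.2), if_pos ⟨h0, by simp [hkj]⟩]
      · have hcond : (PySem.List.pyGetD S j 0 == 0) = false := by
          rw [PySem.List.pyGetD_of_nonneg _ _ hj0, ← hk]
          simpa using h0
        have hgv : pvMark i S j = S := by
          rw [pvMark, if_neg (by rw [hcond]; exact Bool.false_ne_true)]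
        rw [hgv, if_neg (fun hc => h0 hc.1), if_neg (fun hc => h0 hc.1)]
    · have hkj : (k : Int) ≠ j := by omega
      have hgv : (pvMark i S j).getD k 0 = S.getD k 0 := by
        rw [pvMark]
        split_ifs with hc
        · rw [PySem.List.pySetD_of_nonneg _ _ hj0, List.getD_eq_getElem?_getD,
            List.getD_eq_getElem?_getD, List.getElem?_set_ne (show j.toNat ≠ k by omega)]
        · rfl
      rw [hgv]
      simp [List.mem_cons, hkj]

-- the invariant of Source B's spf-building loop after it has processed i = 2 .. I-1
def pvSpfInv (n : Int) (I : Nat) (S : List Int) : Prop :=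
  S.length = (n + 1).toNat ∧
    ∀ k : Nat, k < (n + 1).toNat →
      S.getD k 0 = ((if 2 ≤ k ∧ k.minFac < I then k.minFac else 0 : Nat) : Int)

theorem pvSpfInv_init (n : Int) (I : Nat) (hI : I ≤ 2) :
    pvSpfInv n I (List.replicate (n + 1).toNat (0 : Int)) := by
  refine ⟨List.length_replicate, fun k hk => ?_⟩
  have hno : ¬(2 ≤ k ∧ k.minFac < I) := by
    rintro ⟨h2, hlt⟩
    have := pvMinFac_two_le h2
    omega
  rw [if_neg hno]
  simp [List.getD_eq_getElem?_getD, hk]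

theorem pvSpfStep_inv (n : Int) (I : Nat) (hI : 2 ≤ I) (hIn : (I : Int) ≤ n)
    (S : List Int) (hinv : pvSpfInv n I S) : pvSpfInv n (I + 1) (pvSpfStep n S (I : Int)) := by
  obtain ⟨hlen, hval⟩ := hinv
  have hIlt : I < (n + 1).toNat := by omega
  have hgetI : PySem.List.pyGetD S (I : Int) 0
      = ((if 2 ≤ I ∧ I.minFac < I then I.minFac else 0 : Nat) : Int) := by
    rw [PySem.List.pyGetD_of_nonneg _ _ (by positivity), Int.toNat_natCast]
    exact hval I hIlt
  by_cases hP : I.Prime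
  · -- spf[I] == 0 here (I has no factor below itself), so the marking pass runs
    have hmf : ¬ I.minFac < I := by
      rw [(Nat.prime_def_minFac.mp hP).2]
      omega
    have hcond : (PySem.List.pyGetD S (I : Int) 0 == 0) = true := by
      rw [hgetI, if_neg (by tauto)]
      simp
    rw [pvSpfStep, if_pos hcond]
    have hIpos : (0 : Int) < (I : Int) := by positivity
    have hbnd : ∀ j ∈ PySem.List.pyRange (I : Int) (n + 1) (I : Int),
        0 ≤ j ∧ j.toNat < S.length := by
      intro j hj
      rw [PySem.List.mem_pyRange_iff_of_pos hIpos] at hj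
      refine ⟨by omega, ?_⟩
      rw [hlen]; omega
    refine ⟨by rw [pvLength_foldl_mark, hlen], fun k hk => ?_⟩
    rw [pvGetD_foldl_mark (I : Int) _ _ (pvNodup_pyRange_pos hIpos) hbnd,
      hval k hk]
    have hmem := pvMem_mult (n := n) (D := I) (k := k) (by omega) (by omega)
    by_cases hk2 : 2 ≤ k
    · by_cases hlt : k.minFac < I
      · have hne : ((if 2 ≤ k ∧ k.minFac < I then k.minFac else 0 : Nat) : Int) ≠ 0 := by
          rw [if_pos ⟨hk2, hlt⟩]
          have := pvMinFac_two_le hk2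
          simp
          omega
        rw [if_neg (fun hc => hne hc.1), if_pos ⟨hk2, hlt⟩, if_pos ⟨hk2, by omega⟩]
      · have h0 : ((if 2 ≤ k ∧ k.minFac < I then k.minFac else 0 : Nat) : Int) = 0 := by
          rw [if_neg (by tauto)]
          simp
        by_cases heq : k.minFac = I
        · have hm : I ∣ k ∧ I ≤ k :=
            ⟨heq ▸ Nat.minFac_dvd k, heq ▸ Nat.minFac_le (by omega)⟩
          rw [if_pos ⟨h0, hmem.mpr hm⟩, if_pos ⟨hk2, by omega⟩, heq]
        · have hnm : ¬(I ∣ k ∧ I ≤ k) := by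
            rintro ⟨hdvd, -⟩
            have := Nat.minFac_le_of_dvd hI hdvd
            omega
          have hnc : ¬(2 ≤ k ∧ k.minFac < I + 1) := by
            rintro ⟨-, hc⟩
            omega
          rw [if_neg (fun hc => hnm (hmem.mp hc.2)), h0, if_neg hnc]
          simp
    · have hnm : ¬(I ∣ k ∧ I ≤ k) := by rintro ⟨-, hc⟩; omega
      rw [if_neg (fun hc => hnm (hmem.mp hc.2)), if_neg (by tauto), if_neg (by tauto)]
  · -- I composite: spf[I] was already set, nothing is marked, the predicate does not move
    have hmf : I.minFac < I := by
      have h1 := Nat.minFac_le (show 0 < I by omega)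
      have h2 : I.minFac ≠ I := fun he => hP (Nat.prime_def_minFac.mpr ⟨hI, he⟩)
      omega
    have hcond : (PySem.List.pyGetD S (I : Int) 0 == 0) = false := by
      rw [hgetI, if_pos ⟨hI, hmf⟩]
      have := pvMinFac_two_le hI
      simp
      omega
    rw [pvSpfStep, if_neg (by rw [hcond]; exact Bool.false_ne_true)]
    refine ⟨hlen, fun k hk => ?_⟩
    rw [hval k hk]
    congr 1
    refine if_congr ?_ rfl rfl
    constructor
    · rintro ⟨a, b⟩; exact ⟨a, by omega⟩
    · rintro ⟨a, b⟩
      refine ⟨a, ?_⟩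
      rcases Nat.lt_or_ge k.minFac I with hc | hc
      · exact hc
      · have he : k.minFac = I := by omega
        exact absurd (he ▸ Nat.minFac_prime (by omega : k ≠ 1)) hP

theorem pvSpf_loop (n : Int) (I : Nat) (hI : (I : Int) ≤ n + 1) :
    pvSpfInv n I ((PySem.List.pyRange 2 (I : Int) 1).foldl (pvSpfStep n)
      (List.replicate (n + 1).toNat (0 : Int))) := by
  induction I with
  | zero =>
    rw [PySem.List.pyRange_one_eq_nil (by omega), List.foldl_nil]
    exact pvSpfInv_init n 0 (by omega)
  | succ I ih =>
    by_cases hI2 : 2 ≤ I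
    · have hsplit : PySem.List.pyRange 2 ((I : Int) + 1) 1
          = PySem.List.pyRange 2 (I : Int) 1 ++ [(I : Int)] :=
        PySem.List.pyRange_one_succ_right (by omega)
      rw [show ((I + 1 : Nat) : Int) = (I : Int) + 1 by push_cast; ring, hsplit,
        List.foldl_append]
      simp only [List.foldl_cons, List.foldl_nil]
      exact pvSpfStep_inv n I hI2 (by push_cast at hI ⊢; omega) _
        (ih (by push_cast at hI ⊢; omega))
    · rw [show ((I + 1 : Nat) : Int) = (I : Int) + 1 by push_cast; ring,
        PySem.List.pyRange_one_eq_nil (by omega), List.foldl_nil]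
      exact pvSpfInv_init n (I + 1) (by omega)

theorem pvSpf_getD (n : Int) (k : Nat) (h2 : 2 ≤ k) (hk : k < (n + 1).toNat) :
    PySem.List.pyGetD (pvSpf n) (k : Int) 0 = (k.minFac : Int) := by
  have hloop := pvSpf_loop n (n + 1).toNat (by omega)
  rw [show (((n + 1).toNat : Nat) : Int) = n + 1 by omega] at hloop
  rw [pvSpf, PySem.List.pyGetD_of_nonneg _ _ (by positivity), Int.toNat_natCast,
    hloop.2 k hk]
  have hlt : k.minFac < (n + 1).toNat := by
    have := Nat.minFac_le (show 0 < k by omega)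
    omega
  rw [if_pos ⟨h2, hlt⟩]

theorem pvWalk_eq (S : List Int) (N : Nat)
    (hS : ∀ k : Nat, 2 ≤ k → k < N → PySem.List.pyGetD S (k : Int) 0 = (k.minFac : Int)) :
    ∀ m cnt : Nat, 0 < m → m < N → pvWalk S m cnt = cnt + m.primeFactors.card := by
  intro m cnt
  induction m, cnt using pvWalk.induct (S := S) with
  | case1 m cnt h ih =>
    intro hm hmN
    have hget : PySem.List.pyGetD S (m : Int) 0 = (m.minFac : Int) := hS m (by omega) hmN
    have htn : (PySem.List.pyGetD S (m : Int) 0).toNat = m.minFac := by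
      rw [hget, Int.toNat_natCast]
    have hPp : m.minFac.Prime := Nat.minFac_prime (by omega : m ≠ 1)
    have hm0 : 0 < m := by omega
    have hs_pos : 0 < pvStrip m.minFac m := pvStrip_pos hm0
    have hs_le : pvStrip m.minFac m ≤ m := pvStrip_le _ _
    have hfac := pvStrip_primeFactors hPp hm0
    have hmem : m.minFac ∈ m.primeFactors :=
      Nat.mem_primeFactors.2 ⟨hPp, Nat.minFac_dvd m, by omega⟩
    have hcard : m.primeFactors.card = (m.primeFactors.erase m.minFac).card + 1 := by
      rw [Finset.card_erase_of_mem hmem]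
      have : 0 < m.primeFactors.card := Finset.card_pos.2 ⟨_, hmem⟩
      omega
    rw [htn] at ih
    rw [pvWalk, dif_pos h, htn, ih hs_pos (by omega), hfac]
    omega
  | case2 m cnt h =>
    intro hm hmN
    rw [pvWalk, dif_neg h]
    by_cases hm1 : 1 < m
    · exfalso
      have hget : PySem.List.pyGetD S (m : Int) 0 = (m.minFac : Int) := hS m (by omega) hmN
      have h2 : 2 ≤ m.minFac := pvMinFac_two_le (by omega)
      refine h ⟨hm1, ?_, ?_⟩
      · rw [hget]; exact_mod_cast h2
      · rw [hget, Int.toNat_natCast]; exact Nat.minFac_dvd m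
    · have : m = 1 := by omega
      subst this
      simp

theorem pvWalk_count (n : Int) (D : Nat) (h2 : 2 ≤ D) (hDn : (D : Int) ≤ n) :
    pvWalk (pvSpf n) D 0 = D.primeFactors.card := by
  have h := pvWalk_eq (pvSpf n) (n + 1).toNat
    (fun k hk2 hkN => pvSpf_getD n k hk2 hkN) D 0 (by omega) (by omega)
  simpa using h

-- ---------- B side final assembly ----------

theorem pvAlt_loop (n : Int) (D : Nat) (hD : (D : Int) ≤ n + 1) :
    (PySem.List.pyRange 2 (D : Int) 1).foldl
        (fun ans d => if 3 ≤ pvWalk (pvSpf n) d.toNat 0 then ans ++ [PySem.Int.toStr d] else ans)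
        ([] : List String) = pvAns D := by
  induction D with
  | zero => rw [PySem.List.pyRange_one_eq_nil (by omega), List.foldl_nil, pvAns_zero]
  | succ D ih =>
    by_cases hD2 : 2 ≤ D
    · have hsplit : PySem.List.pyRange 2 ((D : Int) + 1) 1
          = PySem.List.pyRange 2 (D : Int) 1 ++ [(D : Int)] :=
        PySem.List.pyRange_one_succ_right (by omega)
      rw [show ((D + 1 : Nat) : Int) = (D : Int) + 1 by push_cast; ring, hsplit,
        List.foldl_append, ih (by push_cast at hD ⊢; omega)]
      simp only [List.foldl_cons, List.foldl_nil, Int.toNat_natCast]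
      simp only [pvWalk_count n D (by omega) (by omega)]
      rw [pvAns_succ]
      by_cases h3 : 3 ≤ D.primeFactors.card
      · rw [if_pos h3, if_pos h3]
      · rw [if_neg h3, if_neg h3, List.append_nil]
    · rw [show ((D + 1 : Nat) : Int) = (D : Int) + 1 by push_cast; ring,
        PySem.List.pyRange_one_eq_nil (by omega), List.foldl_nil,
        pvAns_of_le_two (by omega)]

theorem pvSieve_alt_eq (n : Int) : sieve_fast_alt n = pvAns (n + 1).toNat := by
  simp only [sieve_fast_alt]
  by_cases hn : 2 ≤ n + 1
  · have h := pvAlt_loop n (n + 1).toNat (by omega)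
    rw [show (((n + 1).toNat : Nat) : Int) = n + 1 by omega] at h
    exact h
  · rw [PySem.List.pyRange_one_eq_nil (by omega), List.foldl_nil,
      pvAns_of_le_two (by omega)]

-- ===== VERDICT (by name: the statement is the Claim_ definition above) =====
theorem sieve_fast_spec : Claim_equal_sieve_fast := by
  intro n _
  unfold Spec_sieve_fast
  rw [pvSieve_fast_eq, pvSieve_alt_eq]
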